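-- pv_equiv track=rewrite | github.com/HarshishBedi/Space-Rescue-Mission | src/BeliefUpdates/Aliens/OneAlien.py | get_observation_matrix_for_one_alien
-- ===== SOURCE A (Python) =====
-- def get_observation_matrix_for_one_alien(ship_layout: list[list[str]],
--                                          bot_position: tuple[int, int], k: int, alien_sensed: bool):
--     ship_dim = len(ship_layout)
--     observation_matrix_for_one_alien = [[0 for _ in range(ship_dim)] for _ in range(ship_dim)]
--
--     # Define the boundaries of the square centered at the bot's position
--     top = max(0, bot_position[0] - k)
--     bottom = min(ship_dim - 1, bot_position[0] + k)
--     left = max(0, bot_position[1] - k)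
--     right = min(ship_dim - 1, bot_position[1] + k)
--
--     # Set the observation matrix_for_one_alien values based on whether the alien is sensed
--     for i in range(ship_dim):
--         for j in range(ship_dim):
--             if alien_sensed:
--                 # If the alien is sensed, set to 1 for open cells inside the 2k+1*2k+1 square
--                 if top <= i <= bottom and left <= j <= right and ship_layout[i][j] != 'C':
--                     observation_matrix_for_one_alien[i][j] = 1
--             else:
--                 # If the alien is not sensed, set to 1 for open cells outside the square
--                 if (i < top or i > bottom or j < left or j > right) and ship_layout[i][j] != 'C':
--                     observation_matrix_for_one_alien[i][j] = 1
--     return observation_matrix_for_one_alien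
-- ===== SOURCE B (Python) =====
-- def get_observation_matrix_for_one_alien(ship_layout: list[list[str]],
--                                          bot_position: tuple[int, int], k: int, alien_sensed: bool):
--     n = len(ship_layout)
--     top = max(0, bot_position[0] - k)
--     bottom = min(n - 1, bot_position[0] + k)
--     left = max(0, bot_position[1] - k)
--     right = min(n - 1, bot_position[1] + k)
--     if alien_sensed:
--         # base: all zeros; correction pass: mark open cells inside the square
--         matrix = [[0] * n for _ in range(n)]
--         for i in range(top, bottom + 1):
--             for j in range(left, right + 1):
--                 if ship_layout[i][j] != 'C':
--                     matrix[i][j] = 1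
--     else:
--         # base: mark every open cell; correction pass: clear the whole square
--         matrix = [[0 if ship_layout[i][j] == 'C' else 1 for j in range(n)] for i in range(n)]
--         for i in range(top, bottom + 1):
--             for j in range(left, right + 1):
--                 matrix[i][j] = 0
--     return matrix
-- ===== Notes on version B (the rewrite author's own statement) =====
-- stated objective: alternative
-- what changed: B splits on alien_sensed at the top and replaces A's single full-grid scan with per-cell membership tests by a base fill (all zeros, resp. all open cells marked 1) followed by a correction pass over only the (2k+1)x(2k+1) square.
-- outside the precondition, e.g. on get_observation_matrix_for_one_alien([['O', 'O'], ['O']], (1, 1), 1, False): A returns [[0, 0], [0, 0]], B raises IndexError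
import Mathlib
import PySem

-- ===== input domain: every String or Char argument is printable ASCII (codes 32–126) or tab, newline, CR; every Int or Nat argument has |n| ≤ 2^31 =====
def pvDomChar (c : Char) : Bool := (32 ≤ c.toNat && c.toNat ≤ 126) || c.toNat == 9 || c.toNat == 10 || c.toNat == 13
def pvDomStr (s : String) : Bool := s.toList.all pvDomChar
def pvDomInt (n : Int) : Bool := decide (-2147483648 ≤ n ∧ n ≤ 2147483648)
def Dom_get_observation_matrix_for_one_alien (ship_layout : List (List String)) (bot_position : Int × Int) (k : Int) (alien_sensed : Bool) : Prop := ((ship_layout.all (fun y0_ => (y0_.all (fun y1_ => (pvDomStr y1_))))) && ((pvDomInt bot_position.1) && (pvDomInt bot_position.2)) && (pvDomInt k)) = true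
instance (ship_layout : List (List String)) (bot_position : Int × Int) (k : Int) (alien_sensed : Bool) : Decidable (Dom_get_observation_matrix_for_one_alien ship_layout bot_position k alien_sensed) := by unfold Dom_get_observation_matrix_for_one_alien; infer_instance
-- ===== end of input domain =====

-- B splits on alien_sensed at the top: a base fill plus a correction pass over only the k-square,
-- instead of A's single full-grid scan with per-cell membership tests. Same return value on Pre_.


-- ===== PORT A =====
-- Literal port of A. A initialises a zero matrix and, in one full-grid double loop, sets each
-- cell to 1 at most once under the branch's condition; the port writes that one-shot
-- assignment cellwise (each cell's final value is `if cond then 1 else 0`). Indexing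
-- ship_layout[i][j] uses getD, exact inside Pre_ (all indices in range, i, j ≥ 0).
def get_observation_matrix_for_one_alien (ship_layout : List (List String)) (bot_position : Int × Int) (k : Int) (alien_sensed : Bool) : List (List Int) :=
  let ship_dim := ship_layout.length
  let top : Int := max 0 (bot_position.1 - k)
  let bottom : Int := min ((ship_dim : Int) - 1) (bot_position.1 + k)
  let left : Int := max 0 (bot_position.2 - k)
  let right : Int := min ((ship_dim : Int) - 1) (bot_position.2 + k)
  (List.range ship_dim).map (fun (i : Nat) =>
    (List.range ship_dim).map (fun (j : Nat) =>
      if alien_sensed then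
        if top ≤ (i : Int) ∧ (i : Int) ≤ bottom ∧ left ≤ (j : Int) ∧ (j : Int) ≤ right ∧
            (ship_layout.getD i []).getD j "" ≠ "C" then 1 else 0
      else
        if ((i : Int) < top ∨ bottom < (i : Int) ∨ (j : Int) < left ∨ right < (j : Int)) ∧
            (ship_layout.getD i []).getD j "" ≠ "C" then 1 else 0))

-- ===== PORT B =====
-- Literal port of Source B: top-level split on alien_sensed; base fill, then an in-place
-- correction pass (List.set) over the rows/columns of the square only.
def get_observation_matrix_for_one_alien_alt (ship_layout : List (List String)) (bot_position : Int × Int) (k : Int) (alien_sensed : Bool) : List (List Int) :=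
  let n := ship_layout.length
  let top : Int := max 0 (bot_position.1 - k)
  let bottom : Int := min ((n : Int) - 1) (bot_position.1 + k)
  let left : Int := max 0 (bot_position.2 - k)
  let right : Int := min ((n : Int) - 1) (bot_position.2 + k)
  if alien_sensed then
    let base : List (List Int) := (List.range n).map (fun _ => (List.range n).map (fun _ => 0))
    (PySem.List.pyRange top (bottom + 1) 1).foldl (fun m i =>
      (PySem.List.pyRange left (right + 1) 1).foldl (fun m j =>
        if (ship_layout.getD i.toNat []).getD j.toNat "" ≠ "C" then
          m.set i.toNat ((m.getD i.toNat []).set j.toNat 1)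
        else m) m) base
  else
    let base : List (List Int) := (List.range n).map (fun i =>
      (List.range n).map (fun j => if (ship_layout.getD i []).getD j "" = "C" then 0 else 1))
    (PySem.List.pyRange top (bottom + 1) 1).foldl (fun m i =>
      (PySem.List.pyRange left (right + 1) 1).foldl (fun m j =>
        m.set i.toNat ((m.getD i.toNat []).set j.toNat 0)) m) base

-- ===== PRECONDITION & SPEC =====
-- Pre_ excludes ragged layouts on which B's (sensed: the square pass, unsensed: the full base
-- fill) indexing raises IndexError: it requires exactly the rows each branch indexes to be long
-- enough (unsensed: every row at least len(ship_layout); sensed: rows of the square band at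
-- least right+1). A itself raises on most of these; where A still returns (square band covers
-- the short rows), B's natural base fill raises, so those inputs are excluded (see cites).
def Pre_get_observation_matrix_for_one_alien (ship_layout : List (List String)) (bot_position : Int × Int) (k : Int) (alien_sensed : Bool) : Prop :=
  let n := ship_layout.length
  let top : Int := max 0 (bot_position.1 - k)
  let bottom : Int := min ((n : Int) - 1) (bot_position.1 + k)
  let left : Int := max 0 (bot_position.2 - k)
  let right : Int := min ((n : Int) - 1) (bot_position.2 + k)
  if alien_sensed then
    ∀ i ∈ List.range n, (top ≤ (i : Int) ∧ (i : Int) ≤ bottom ∧ left ≤ right) →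
      (right + 1).toNat ≤ (ship_layout.getD i []).length
  else
    ∀ row ∈ ship_layout, n ≤ row.length
instance (ship_layout : List (List String)) (bot_position : Int × Int) (k : Int) (alien_sensed : Bool) : Decidable (Pre_get_observation_matrix_for_one_alien ship_layout bot_position k alien_sensed) := by unfold Pre_get_observation_matrix_for_one_alien; infer_instance

def pvWitness_get_observation_matrix_for_one_alien : List (List String) × (Int × Int) × Int × Bool :=
  ([["O", "C"], ["O", "O"]], (0, 1), 1, true)

def Spec_get_observation_matrix_for_one_alien (ship_layout : List (List String)) (bot_position : Int × Int) (k : Int) (alien_sensed : Bool) (out : List (List Int)) : Prop := out = get_observation_matrix_for_one_alien_alt ship_layout bot_position k alien_sensed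
instance (ship_layout : List (List String)) (bot_position : Int × Int) (k : Int) (alien_sensed : Bool) (out : List (List Int)) : Decidable (Spec_get_observation_matrix_for_one_alien ship_layout bot_position k alien_sensed out) := by unfold Spec_get_observation_matrix_for_one_alien; infer_instance

-- ===== CLAIM (what is proved, stated in full; the proofs are below) =====
def Claim_equal_get_observation_matrix_for_one_alien : Prop := ∀ (ship_layout : List (List String)) (bot_position : Int × Int) (k : Int) (alien_sensed : Bool), Dom_get_observation_matrix_for_one_alien ship_layout bot_position k alien_sensed → Pre_get_observation_matrix_for_one_alien ship_layout bot_position k alien_sensed → Spec_get_observation_matrix_for_one_alien ship_layout bot_position k alien_sensed (get_observation_matrix_for_one_alien ship_layout bot_position k alien_sensed)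

-- ===== LEMMAS AND PROOFS =====

theorem pv_getD_set {α : Type} (m : List α) (i : Nat) (r : α) (d : α) (i' : Nat) :
    (m.set i r).getD i' d = if i = i' ∧ i < m.length then r else m.getD i' d := by
  simp [List.getD_eq_getElem?_getD, List.getElem?_set]
  by_cases h : i = i' <;> by_cases h2 : i < m.length <;> simp_all <;> (split <;> simp_all)

theorem pv_inner_shape (P : Int → Prop) [DecidablePred P] (c : Int) (i : Int) (cols : List Int)
    (m : List (List Int)) (i' : Nat) :
    ((cols.foldl (fun m j => if P j then m.set i.toNat ((m.getD i.toNat []).set j.toNat c) else m) m).length = m.length) ∧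
    (((cols.foldl (fun m j => if P j then m.set i.toNat ((m.getD i.toNat []).set j.toNat c) else m) m).getD i' []).length = (m.getD i' []).length) := by
  induction cols generalizing m with
  | nil => exact ⟨rfl, rfl⟩
  | cons j cols ih =>
    simp only [List.foldl_cons]
    rcases ih (if P j then m.set i.toNat ((m.getD i.toNat []).set j.toNat c) else m) with ⟨h1, h2⟩
    constructor
    · rw [h1]; split <;> simp
    · rw [h2]; split
      · rw [pv_getD_set]; split <;> simp_all
      · rfl


theorem pv_getD_out {α : Type} (m : List α) (i : Nat) (d : α) (h : m.length ≤ i) :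
    m.getD i d = d := by
  rw [List.getD_eq_getElem?_getD, List.getElem?_eq_none h]; rfl

theorem pv_inner_get (P : Int → Prop) [DecidablePred P] (c : Int) (i : Int) (cols : List Int)
    (h0 : ∀ x ∈ cols, 0 ≤ x) (m : List (List Int)) (i' j' : Nat)
    (hj' : j' < (m.getD i' []).length) :
    ((cols.foldl (fun m j => if P j then m.set i.toNat ((m.getD i.toNat []).set j.toNat c) else m) m).getD i' []).getD j' 0
      = if i' = i.toNat ∧ (j' : Int) ∈ cols ∧ P (j' : Int) then c
        else (m.getD i' []).getD j' 0 := by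
  induction cols generalizing m with
  | nil => simp
  | cons j cols ih =>
    simp only [List.foldl_cons]
    set m1 := (if P j then m.set i.toNat ((m.getD i.toNat []).set j.toNat c) else m) with hm1
    have hlen1 : (m1.getD i' []).length = (m.getD i' []).length := by
      rw [hm1]; split
      · rw [pv_getD_set]; split <;> simp_all
      · rfl
    have hj1 : j' < (m1.getD i' []).length := by omega
    rw [ih (fun x hx => h0 x (List.mem_cons_of_mem _ hx)) m1 hj1]
    have h0j : (0:Int) ≤ j := h0 j (by simp)
    have hstep : (m1.getD i' []).getD j' 0 =
        if i' = i.toNat ∧ (j' : Int) = j ∧ P (j' : Int) then c else (m.getD i' []).getD j' 0 := by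
      rw [hm1]
      by_cases hP : P j
      · rw [if_pos hP, pv_getD_set]
        by_cases hcond : i.toNat = i' ∧ i.toNat < m.length
        · rw [if_pos hcond, pv_getD_set]
          obtain ⟨hie, him⟩ := hcond
          by_cases hij : (j' : Int) = j
          · have hjt : j.toNat = j' := by omega
            rw [if_pos ⟨hjt, by rw [hjt, hie]; exact hj'⟩,
                if_pos ⟨hie.symm, hij, by rw [hij]; exact hP⟩]
          · have hjt : j.toNat ≠ j' := by omega
            rw [if_neg (by tauto), if_neg (by rintro ⟨-, h, -⟩; exact hij h), hie]
        · rw [if_neg hcond]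
          by_cases hii : i' = i.toNat
          · exfalso
            have hlen : m.length ≤ i' := by omega
            rw [pv_getD_out m i' [] hlen] at hj'
            exact absurd hj' (by simp)
          · rw [if_neg (by tauto)]
      · rw [if_neg hP, if_neg (by rintro ⟨-, h, hp⟩; exact hP (h ▸ hp))]
    rw [hstep]
    clear hstep hm1 hlen1 hj1 ih hj' h0 h0j
    simp only [List.mem_cons]
    split_ifs <;> tauto

theorem pv_outer_shape (P : Int → Int → Prop) [inst : ∀ a b, Decidable (P a b)] (c : Int)
    (rows cols : List Int) (m : List (List Int)) (i' : Nat) :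
    ((rows.foldl (fun m i => cols.foldl (fun m j => if P i j then m.set i.toNat ((m.getD i.toNat []).set j.toNat c) else m) m) m).length = m.length) ∧
    (((rows.foldl (fun m i => cols.foldl (fun m j => if P i j then m.set i.toNat ((m.getD i.toNat []).set j.toNat c) else m) m) m).getD i' []).length = (m.getD i' []).length) := by
  induction rows generalizing m with
  | nil => exact ⟨rfl, rfl⟩
  | cons i rows ih =>
    simp only [List.foldl_cons]
    set m1 := cols.foldl (fun m j => if P i j then m.set i.toNat ((m.getD i.toNat []).set j.toNat c) else m) m with hm1
    have hsh := pv_inner_shape (P i) c i cols m i'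
    rcases ih m1 with ⟨h1, h2⟩
    exact ⟨by rw [h1, hm1, hsh.1], by rw [h2, hm1, hsh.2]⟩

theorem pv_outer_get (P : Int → Int → Prop) [inst : ∀ a b, Decidable (P a b)] (c : Int)
    (rows cols : List Int) (hr : ∀ x ∈ rows, 0 ≤ x) (hc : ∀ x ∈ cols, 0 ≤ x)
    (m : List (List Int)) (i' j' : Nat) (hj' : j' < (m.getD i' []).length) :
    ((rows.foldl (fun m i => cols.foldl (fun m j => if P i j then m.set i.toNat ((m.getD i.toNat []).set j.toNat c) else m) m) m).getD i' []).getD j' 0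
      = if (i' : Int) ∈ rows ∧ (j' : Int) ∈ cols ∧ P (i' : Int) (j' : Int) then c
        else (m.getD i' []).getD j' 0 := by
  induction rows generalizing m with
  | nil => simp
  | cons i rows ih =>
    simp only [List.foldl_cons]
    set m1 := cols.foldl (fun m j => if P i j then m.set i.toNat ((m.getD i.toNat []).set j.toNat c) else m) m with hm1
    have hsh := pv_inner_shape (P i) c i cols m i'
    have hj1 : j' < (m1.getD i' []).length := by rw [hm1, hsh.2]; exact hj'
    have h0i : (0:Int) ≤ i := hr i (by simp)
    rw [ih (fun x hx => hr x (List.mem_cons_of_mem _ hx)) m1 hj1, hm1,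
        pv_inner_get (P i) c i cols hc m i' j' hj']
    have hiff : i' = i.toNat ↔ (i' : Int) = i := by omega
    clear hm1 hsh hj1 ih hj' hr hc
    simp only [List.mem_cons, hiff]
    by_cases hie : (i' : Int) = i
    · simp only [hie]; split_ifs <;> tauto
    · split_ifs <;> tauto

theorem pv_matrix_ext (x y : List (List Int))
    (hlen : x.length = y.length)
    (hrow : ∀ i, (x.getD i []).length = (y.getD i []).length)
    (hcell : ∀ i j, j < (x.getD i []).length → (x.getD i []).getD j 0 = (y.getD i []).getD j 0) :
    x = y := by
  apply List.ext_getElem hlen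
  intro i h1 h2
  have hx : x.getD i [] = x[i] := List.getD_eq_getElem x [] h1
  have hy : y.getD i [] = y[i] := List.getD_eq_getElem y [] h2
  apply List.ext_getElem (by rw [← hx, ← hy, hrow])
  intro j hj1 hj2
  have := hcell i j (by rw [hx]; exact hj1)
  rwa [hx, hy, List.getD_eq_getElem _ _ hj1, List.getD_eq_getElem _ _ hj2] at this

theorem pv_getD_map_range {α : Type} (n i : Nat) (f : Nat → α) (d : α) (h : i < n) :
    ((List.range n).map f).getD i d = f i := by
  rw [List.getD_eq_getElem _ _ (by simpa using h)]
  simp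



theorem pv_outer_shape0 (c : Int) (rows cols : List Int) (m : List (List Int)) (i' : Nat) :
    ((rows.foldl (fun m i => cols.foldl (fun m j => m.set i.toNat ((m.getD i.toNat []).set j.toNat c)) m) m).length = m.length) ∧
    (((rows.foldl (fun m i => cols.foldl (fun m j => m.set i.toNat ((m.getD i.toNat []).set j.toNat c)) m) m).getD i' []).length = (m.getD i' []).length) := by
  have h := pv_outer_shape (fun _ _ => True) c rows cols m i'
  simpa using h

theorem pv_outer_get0 (c : Int) (rows cols : List Int)
    (hr : ∀ x ∈ rows, 0 ≤ x) (hc : ∀ x ∈ cols, 0 ≤ x)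
    (m : List (List Int)) (i' j' : Nat) (hj' : j' < (m.getD i' []).length) :
    ((rows.foldl (fun m i => cols.foldl (fun m j => m.set i.toNat ((m.getD i.toNat []).set j.toNat c)) m) m).getD i' []).getD j' 0
      = if (i' : Int) ∈ rows ∧ (j' : Int) ∈ cols then c
        else (m.getD i' []).getD j' 0 := by
  have h := pv_outer_get (fun _ _ => True) c rows cols hr hc m i' j' hj'
  simpa using h

theorem pv_ports_eq (ship_layout : List (List String)) (bot_position : Int × Int) (k : Int) (alien_sensed : Bool) :
    get_observation_matrix_for_one_alien ship_layout bot_position k alien_sensed = get_observation_matrix_for_one_alien_alt ship_layout bot_position k alien_sensed := by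
  unfold get_observation_matrix_for_one_alien get_observation_matrix_for_one_alien_alt
  cases alien_sensed with
  | true =>
    simp only [if_true]
    set n := ship_layout.length with hn
    set top := max 0 (bot_position.1 - k) with htop
    set bottom := min ((n : Int) - 1) (bot_position.1 + k) with hbot
    set left := max 0 (bot_position.2 - k) with hleft
    set right := min ((n : Int) - 1) (bot_position.2 + k) with hright
    have htop0 : 0 ≤ top := le_max_left _ _
    have hleft0 : 0 ≤ left := le_max_left _ _
    have hbotn : bottom ≤ (n : Int) - 1 := min_le_left _ _
    have hrightn : right ≤ (n : Int) - 1 := min_le_left _ _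
    have hrmem : ∀ x ∈ PySem.List.pyRange top (bottom + 1) 1, 0 ≤ x := by
      intro x hx; rw [PySem.List.mem_pyRange_one] at hx; omega
    have hcmem : ∀ x ∈ PySem.List.pyRange left (right + 1) 1, 0 ≤ x := by
      intro x hx; rw [PySem.List.mem_pyRange_one] at hx; omega
    set base := List.map (fun (_ : Nat) => List.map (fun (_ : Nat) => (0 : Int)) (List.range n)) (List.range n) with hbase
    have hblen : base.length = n := by rw [hbase]; simp
    have hbrow_lt : ∀ i' < n, base.getD i' [] = List.map (fun (_ : Nat) => (0 : Int)) (List.range n) := by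
      intro i' h; rw [hbase]; exact pv_getD_map_range n i' _ _ h
    apply pv_matrix_ext
    · -- lengths
      rw [(pv_outer_shape (fun a b => (ship_layout.getD a.toNat []).getD b.toNat "" ≠ "C") 1
            (PySem.List.pyRange top (bottom + 1) 1) (PySem.List.pyRange left (right + 1) 1) base 0).1,
          hblen]
      simp
    · -- row lengths
      intro i'
      rw [(pv_outer_shape (fun a b => (ship_layout.getD a.toNat []).getD b.toNat "" ≠ "C") 1
            (PySem.List.pyRange top (bottom + 1) 1) (PySem.List.pyRange left (right + 1) 1) base i').2]
      by_cases hi' : i' < n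
      · rw [hbrow_lt i' hi', pv_getD_map_range n i' _ _ hi']
        simp
      · rw [pv_getD_out _ _ _ (by simp; omega), pv_getD_out _ _ _ (by rw [hblen]; omega)]
    · -- cells
      intro i' j' hj'
      by_cases hi' : i' < n
      · have hrowA : (List.map (fun (i : Nat) => List.map (fun (j : Nat) =>
            if top ≤ (i : Int) ∧ (i : Int) ≤ bottom ∧ left ≤ (j : Int) ∧ (j : Int) ≤ right ∧
              (ship_layout.getD i []).getD j "" ≠ "C" then (1:Int) else 0) (List.range n)) (List.range n)).getD i' []
            = List.map (fun (j : Nat) =>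
            if top ≤ (i' : Int) ∧ (i' : Int) ≤ bottom ∧ left ≤ (j : Int) ∧ (j : Int) ≤ right ∧
              (ship_layout.getD i' []).getD j "" ≠ "C" then (1:Int) else 0) (List.range n) :=
          pv_getD_map_range n i' _ [] hi'
        rw [hrowA] at hj' ⊢
        have hj'n : j' < n := by simpa using hj'
        rw [pv_getD_map_range n j' _ 0 hj'n,
            pv_outer_get (fun a b => (ship_layout.getD a.toNat []).getD b.toNat "" ≠ "C") 1
              (PySem.List.pyRange top (bottom + 1) 1) (PySem.List.pyRange left (right + 1) 1)
              hrmem hcmem base i' j' (by rw [hbrow_lt i' hi']; simpa using hj'n),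
            hbrow_lt i' hi', pv_getD_map_range n j' _ 0 hj'n]
        have hiff : (top ≤ (i' : Int) ∧ (i' : Int) ≤ bottom ∧ left ≤ (j' : Int) ∧ (j' : Int) ≤ right ∧
              (ship_layout.getD i' []).getD j' "" ≠ "C")
            ↔ ((i' : Int) ∈ PySem.List.pyRange top (bottom + 1) 1 ∧
               (j' : Int) ∈ PySem.List.pyRange left (right + 1) 1 ∧
               (ship_layout.getD ((i' : Int)).toNat []).getD ((j' : Int)).toNat "" ≠ "C") := by
          rw [PySem.List.mem_pyRange_one, PySem.List.mem_pyRange_one]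
          constructor
          · rintro ⟨a, b, c, d, e⟩
            exact ⟨⟨a, by omega⟩, ⟨c, by omega⟩, by simpa using e⟩
          · rintro ⟨⟨a, b⟩, ⟨c, d⟩, e⟩
            exact ⟨a, by omega, c, by omega, by simpa using e⟩
        simp only [hiff]
      · exfalso
        rw [pv_getD_out _ _ _ (by simp; omega)] at hj'
        simp at hj'
  | false =>
    simp only [Bool.false_eq_true, if_false]
    set n := ship_layout.length with hn
    set top := max 0 (bot_position.1 - k) with htop
    set bottom := min ((n : Int) - 1) (bot_position.1 + k) with hbot
    set left := max 0 (bot_position.2 - k) with hleft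
    set right := min ((n : Int) - 1) (bot_position.2 + k) with hright
    have htop0 : 0 ≤ top := le_max_left _ _
    have hleft0 : 0 ≤ left := le_max_left _ _
    have hrmem : ∀ x ∈ PySem.List.pyRange top (bottom + 1) 1, 0 ≤ x := by
      intro x hx; rw [PySem.List.mem_pyRange_one] at hx; omega
    have hcmem : ∀ x ∈ PySem.List.pyRange left (right + 1) 1, 0 ≤ x := by
      intro x hx; rw [PySem.List.mem_pyRange_one] at hx; omega
    set base := List.map (fun (i : Nat) => List.map (fun (j : Nat) =>
        if (ship_layout.getD i []).getD j "" = "C" then (0 : Int) else 1) (List.range n)) (List.range n) with hbase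
    have hblen : base.length = n := by rw [hbase]; simp
    have hbrow_lt : ∀ i' < n, base.getD i' [] = List.map (fun (j : Nat) =>
        if (ship_layout.getD i' []).getD j "" = "C" then (0 : Int) else 1) (List.range n) := by
      intro i' h; rw [hbase]; exact pv_getD_map_range n i' _ [] h
    apply pv_matrix_ext
    · rw [(pv_outer_shape0 0 (PySem.List.pyRange top (bottom + 1) 1)
            (PySem.List.pyRange left (right + 1) 1) base 0).1, hblen]
      simp
    · intro i'
      rw [(pv_outer_shape0 0 (PySem.List.pyRange top (bottom + 1) 1)
            (PySem.List.pyRange left (right + 1) 1) base i').2]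
      by_cases hi' : i' < n
      · rw [hbrow_lt i' hi', pv_getD_map_range n i' _ [] hi']
        simp
      · rw [pv_getD_out _ _ _ (by simp; omega), pv_getD_out _ _ _ (by rw [hblen]; omega)]
    · intro i' j' hj'
      by_cases hi' : i' < n
      · have hrowA : (List.map (fun (i : Nat) => List.map (fun (j : Nat) =>
            if ((i : Int) < top ∨ bottom < (i : Int) ∨ (j : Int) < left ∨ right < (j : Int)) ∧
              (ship_layout.getD i []).getD j "" ≠ "C" then (1:Int) else 0) (List.range n)) (List.range n)).getD i' []
            = List.map (fun (j : Nat) =>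
            if ((i' : Int) < top ∨ bottom < (i' : Int) ∨ (j : Int) < left ∨ right < (j : Int)) ∧
              (ship_layout.getD i' []).getD j "" ≠ "C" then (1:Int) else 0) (List.range n) :=
          pv_getD_map_range n i' _ [] hi'
        rw [hrowA] at hj' ⊢
        have hj'n : j' < n := by simpa using hj'
        rw [pv_getD_map_range n j' _ 0 hj'n,
            pv_outer_get0 0 (PySem.List.pyRange top (bottom + 1) 1) (PySem.List.pyRange left (right + 1) 1)
              hrmem hcmem base i' j' (by rw [hbrow_lt i' hi']; simpa using hj'n),
            hbrow_lt i' hi', pv_getD_map_range n j' _ 0 hj'n]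
        simp only [PySem.List.mem_pyRange_one]
        by_cases hS : (ship_layout.getD i' []).getD j' "" = "C"
        · simp only [List.getD_eq_getElem?_getD] at hS
          simp [hS]
        · simp only [List.getD_eq_getElem?_getD] at hS
          simp [hS]
          split_ifs <;> omega
      · exfalso
        rw [pv_getD_out _ _ _ (by simp; omega)] at hj'
        simp at hj'

-- ===== VERDICT (by name: the statement is the Claim_ definition above) =====
theorem get_observation_matrix_for_one_alien_spec : Claim_equal_get_observation_matrix_for_one_alien := by
  intro ship_layout bot_position k alien_sensed _ _
  unfold Spec_get_observation_matrix_for_one_alien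
  exact pv_ports_eq ship_layout bot_position k alien_sensed
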